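-- pv_equiv track=rewrite | github.com/smilingprogrammer/Brain | brain_regions/reasoning/logical_reasoning.py | _parse_proof_steps
-- ===== SOURCE A (Python) =====
-- from typing import Dict, List, Any, Optional
--
-- def _parse_proof_steps(proof_text: str) -> List[Dict]:
--     """Parse proof text into structured steps"""
--     steps = []
--     lines = proof_text.split('\n')
--
--     current_step = None
--     for line in lines:
--         line = line.strip()
--         if line and (line[0].isdigit() or line.startswith('-')):
--             if current_step:
--                 steps.append(current_step)
--             current_step = {
--                 "statement": line,
--                 "justification": "",
--                 "rule": ""
--             }
--         elif current_step and line: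
--             current_step["justification"] += line + " "
--
--     if current_step:
--         steps.append(current_step)
--
--     return steps
-- ===== SOURCE B (Python) =====
-- def _parse_proof_steps(proof_text):
--     """Two-phase parse: segment the stripped lines into (header, body-lines) groups,
--     then map each group to its step dict."""
--     lines = [l.strip() for l in proof_text.split('\n')]
--
--     def is_header(line):
--         return bool(line) and (line[0].isdigit() or line[0] == '-')
--
--     groups = []
--     i, n = 0, len(lines)
--     while i < n:
--         if not is_header(lines[i]):
--             i += 1            # skip blanks and stray lines before the next header
--             continue
--         header = lines[i]
--         i += 1
--         body = []             # non-empty lines up to the next header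
--         while i < n and not is_header(lines[i]):
--             if lines[i]:
--                 body.append(lines[i])
--             i += 1
--         groups.append((header, body))
--
--     return [{
--         "statement": h,
--         "justification": "".join(l + " " for l in b),
--         "rule": "",
--     } for h, b in groups]
-- ===== Notes on version B (the rewrite author's own statement) =====
-- stated objective: alternative
-- what changed: Replaces A's single pass with a threaded mutable current_step dict by a recursive descent that first segments the stripped lines into (header, body-lines) groups and then maps each group to its step dict, building the justification with a single join.
import Mathlib
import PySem

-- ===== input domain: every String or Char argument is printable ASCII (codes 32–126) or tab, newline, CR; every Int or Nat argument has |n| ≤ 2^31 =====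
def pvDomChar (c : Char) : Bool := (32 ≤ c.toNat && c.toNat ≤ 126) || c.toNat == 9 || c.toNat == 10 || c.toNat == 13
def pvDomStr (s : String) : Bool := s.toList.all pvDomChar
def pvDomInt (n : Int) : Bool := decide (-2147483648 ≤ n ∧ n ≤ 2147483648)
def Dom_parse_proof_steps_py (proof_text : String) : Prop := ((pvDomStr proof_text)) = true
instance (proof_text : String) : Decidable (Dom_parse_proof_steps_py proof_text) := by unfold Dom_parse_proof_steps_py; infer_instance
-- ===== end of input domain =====

-- B is a recursive descent that first segments the stripped lines into (header, body) groups
-- and then maps each group to its dict — an alternative decomposition of A's single mutable loop.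

-- ===== PORT A =====
-- s.split('\n') (both Pythons call it; sep is non-empty so no exception)
def pvLines (s : String) : List String :=
  (PySem.Chars.splitOn s.toList ['\n']).map String.ofList

-- line[0].isdigit() (A only evaluates it after 'line' has tested truthy)
def pvHeadDigit (s : String) : Bool :=
  match s.toList with
  | [] => false
  | c :: _ => PySem.Chars.isdigit c

-- body of A's for-loop, after 'line = line.strip()': state = (steps, current_step)
def pvStepAux (st : List (PySem.Dict String String) × Option (PySem.Dict String String))
    (line : String) : List (PySem.Dict String String) × Option (PySem.Dict String String) :=
  if !(line == "") && (pvHeadDigit line || PySem.Str.startswith line "-") then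
    (match st.2 with
     | some c => st.1 ++ [c]
     | none => st.1,
     some (((PySem.Dict.empty.insert "statement" line).insert "justification" "").insert "rule" ""))
  else
    match st.2 with
    | some c =>
      if !(line == "") then (st.1, some (c.modify "justification" "" (fun s => s ++ (line ++ " "))))
      else (st.1, some c)
    | none => (st.1, none)

-- body of A's for-loop including 'line = line.strip()'
def pvStepA (st : List (PySem.Dict String String) × Option (PySem.Dict String String))
    (raw : String) : List (PySem.Dict String String) × Option (PySem.Dict String String) :=
  pvStepAux st (PySem.Str.strip raw)

def parse_proof_steps_py (proof_text : String) : List (List (String × String)) :=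
  let lines := pvLines proof_text
  let res := lines.foldl pvStepA ([], none)
  (match res.2 with
   | some c => res.1 ++ [c]
   | none => res.1).map PySem.Dict.items

-- ===== PORT B =====
-- is_header(line) of Source B
def pvIsHeader (s : String) : Bool :=
  match s.toList with
  | [] => false
  | c :: _ => PySem.Chars.isdigit c || c == '-'

-- take_body of Source B: (non-empty body lines before the next header, remaining lines)
def pvTakeBody : List String → List String × List String
  | [] => ([], [])
  | l :: rest =>
    if pvIsHeader l then ([], l :: rest)
    else ((if !(l == "") then [l] else []) ++ (pvTakeBody rest).1, (pvTakeBody rest).2)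

theorem pvTakeBody_snd_len : ∀ (ls : List String), (pvTakeBody ls).2.length ≤ ls.length
  | [] => Nat.le_refl _
  | l :: rest => by
    simp only [pvTakeBody]
    split
    · simp
    · exact Nat.le_succ_of_le (pvTakeBody_snd_len rest)

-- parse of Source B
def pvParse : List String → List (String × List String)
  | [] => []
  | l :: rest =>
    if pvIsHeader l then
      (l, (pvTakeBody rest).1) :: pvParse (pvTakeBody rest).2
    else pvParse rest
termination_by ls => ls.length
decreasing_by
  · exact Nat.lt_succ_of_le (pvTakeBody_snd_len rest)
  · simp

def parse_proof_steps_py_alt (proof_text : String) : List (List (String × String)) :=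
  let lines := (pvLines proof_text).map PySem.Str.strip
  (pvParse lines).map (fun g =>
    [("statement", g.1),
     ("justification", PySem.Str.join "" (g.2.map (fun l => l ++ " "))),
     ("rule", "")])

-- ===== PRECONDITION & SPEC =====
def Spec_parse_proof_steps_py (proof_text : String) (out : List (List (String × String))) : Prop := out = parse_proof_steps_py_alt proof_text
instance (proof_text : String) (out : List (List (String × String))) : Decidable (Spec_parse_proof_steps_py proof_text out) := by unfold Spec_parse_proof_steps_py; infer_instance

-- ===== CLAIM (what is proved, stated in full; the proofs are below) =====
def Claim_equal_parse_proof_steps_py : Prop := ∀ (proof_text : String), Dom_parse_proof_steps_py proof_text → Spec_parse_proof_steps_py proof_text (parse_proof_steps_py proof_text)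

-- ===== LEMMAS AND PROOFS =====

-- the three-key dict both programs build, as a function of statement and justification
def pvDictOf (h j : String) : PySem.Dict String String :=
  ((PySem.Dict.empty.insert "statement" h).insert "justification" j).insert "rule" ""

-- B's justification string for a list of body lines
def pvJust (js : List String) : String :=
  PySem.Str.join "" (js.map (fun l => l ++ " "))

-- A's trailing flush
def pvFinal (st : List (PySem.Dict String String) × Option (PySem.Dict String String)) :
    List (PySem.Dict String String) :=
  match st.2 with
  | some c => st.1 ++ [c]
  | none => st.1

theorem pvDictOf_modify (h j l : String) :
    (pvDictOf h j).modify "justification" "" (fun s => s ++ (l ++ " ")) =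
      pvDictOf h (j ++ (l ++ " ")) := by
  rfl

theorem pvDictOf_items (h j : String) :
    (pvDictOf h j).items = [("statement", h), ("justification", j), ("rule", "")] := by
  rfl

theorem pvCond_eq (s : String) :
    (!(s == "") && (pvHeadDigit s || PySem.Str.startswith s "-")) = pvIsHeader s := by
  unfold pvHeadDigit pvIsHeader
  cases hs : s.toList with
  | nil =>
    have h0 : s = "" := String.toList_injective (by simp [hs])
    subst h0; rfl
  | cons c t =>
    have hne : (s == "") = false := by
      rw [beq_eq_false_iff_ne]
      intro h0; rw [h0] at hs; simp at hs
    have hsw : PySem.Str.startswith s "-" = (c == '-') := by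
      have hb : PySem.Str.startswith s "-" = PySem.Chars.startswith (c :: t) ['-'] := by
        simp [hs]
      rw [hb]
      unfold PySem.Chars.startswith
      simp [List.isPrefixOf, eq_comm]
    rw [hne, hsw]
    simp

theorem pvJust_nil : pvJust [] = "" := by
  rfl

theorem pvJust_cons (l : String) (js : List String) :
    pvJust (l :: js) = (l ++ " ") ++ pvJust js := by
  cases js with
  | nil =>
    apply String.toList_injective
    simp [pvJust, PySem.Str.toList_join, String.toList_append,
      PySem.Chars.join_singleton, PySem.Chars.join_nil]
  | cons y ys =>
    apply String.toList_injective
    simp [pvJust, PySem.Str.toList_join, String.toList_append,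
      PySem.Chars.join_cons_cons]

theorem pvParse_nil : pvParse [] = [] := by
  simp [pvParse]

theorem pvParse_cons_pos {l : String} {rest : List String} (hl : pvIsHeader l = true) :
    pvParse (l :: rest) = (l, (pvTakeBody rest).1) :: pvParse (pvTakeBody rest).2 := by
  rw [pvParse]; simp [hl]

theorem pvParse_cons_neg {l : String} {rest : List String} (hl : pvIsHeader l = false) :
    pvParse (l :: rest) = pvParse rest := by
  rw [pvParse]; simp [hl]

-- the loop invariant while a current_step is open
theorem pvInv_some : ∀ (ls : List String) (steps : List (PySem.Dict String String)) (h j : String),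
    pvFinal (ls.foldl pvStepAux (steps, some (pvDictOf h j))) =
      steps ++ [pvDictOf h (j ++ pvJust (pvTakeBody ls).1)] ++
        (pvParse (pvTakeBody ls).2).map (fun g => pvDictOf g.1 (pvJust g.2))
  | [], steps, h, j => by
    simp [pvFinal, pvTakeBody, pvParse_nil, pvJust_nil, String.append_empty]
  | l :: ls, steps, h, j => by
    by_cases hl : pvIsHeader l = true
    · have hstep : pvStepAux (steps, some (pvDictOf h j)) l
          = (steps ++ [pvDictOf h j], some (pvDictOf l "")) := by
        simp only [pvStepAux, pvCond_eq, hl, if_pos]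
        rfl
      simp only [List.foldl_cons, hstep]
      rw [pvInv_some ls (steps ++ [pvDictOf h j]) l ""]
      have hemp : ("" : String) ++ pvJust (pvTakeBody ls).1 = pvJust (pvTakeBody ls).1 :=
        String.empty_append
      simp [pvTakeBody, hl, pvParse_cons_pos hl, pvJust_nil, String.append_empty, hemp]
    · have hl' : pvIsHeader l = false := by simpa using hl
      by_cases he : l = ""
      · have hstep : pvStepAux (steps, some (pvDictOf h j)) l
            = (steps, some (pvDictOf h j)) := by
          subst he; rfl
        simp only [List.foldl_cons, hstep]
        rw [pvInv_some ls steps h j]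
        have h0 : pvIsHeader "" = false := rfl
        simp [pvTakeBody, he, h0]
      · have hne : (l == "") = false := by rw [beq_eq_false_iff_ne]; exact he
        have hparts : pvHeadDigit l = false ∧ PySem.Chars.startswith l.toList ['-'] = false := by
          cases hsl : l.toList with
          | nil => exact absurd (String.toList_injective (by simp [hsl])) he
          | cons c t =>
            have hih : pvIsHeader l = (PySem.Chars.isdigit c || c == '-') := by
              unfold pvIsHeader; rw [hsl]
            rw [hih] at hl'
            refine ⟨by unfold pvHeadDigit; rw [hsl]; exact (Bool.or_eq_false_iff.mp hl').1, ?_⟩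

            rw [Bool.eq_false_iff]
            intro h3
            rcases List.cons_prefix_cons.mp ((PySem.Chars.startswith_iff _ _).mp h3) with ⟨h4, _⟩
            exact absurd h4.symm (beq_eq_false_iff_ne.mp (Bool.or_eq_false_iff.mp hl').2)
        have hstep : pvStepAux (steps, some (pvDictOf h j)) l
            = (steps, some (pvDictOf h (j ++ (l ++ " ")))) := by
          simp only [pvStepAux, hne]
          simp [pvDictOf_modify]
          exact hparts
        simp only [List.foldl_cons, hstep]
        rw [pvInv_some ls steps h (j ++ (l ++ " "))]
        simp [pvTakeBody, hl', hne, pvJust_cons, String.append_assoc]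

-- the loop invariant before the first header
theorem pvInv_none : ∀ (ls : List String) (steps : List (PySem.Dict String String)),
    pvFinal (ls.foldl pvStepAux (steps, none)) =
      steps ++ (pvParse ls).map (fun g => pvDictOf g.1 (pvJust g.2))
  | [], steps => by simp [pvFinal, pvParse_nil]
  | l :: ls, steps => by
    by_cases hl : pvIsHeader l = true
    · have hstep : pvStepAux (steps, none) l = (steps, some (pvDictOf l "")) := by
        simp only [pvStepAux, pvCond_eq, hl, if_pos]
        rfl
      simp only [List.foldl_cons, hstep]
      rw [pvInv_some ls steps l ""]
      have hemp : ("" : String) ++ pvJust (pvTakeBody ls).1 = pvJust (pvTakeBody ls).1 :=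
        String.empty_append
      simp [pvParse_cons_pos hl, hemp]
    · have hl' : pvIsHeader l = false := by simpa using hl
      have hstep : pvStepAux (steps, none) l = (steps, none) := by
        simp only [pvStepAux, pvCond_eq, hl', Bool.false_eq_true]
        rfl
      simp only [List.foldl_cons, hstep]
      rw [pvInv_none ls steps]
      simp [pvParse_cons_neg hl']

-- ===== VERDICT (by name: the statement is the Claim_ definition above) =====
theorem parse_proof_steps_py_spec : Claim_equal_parse_proof_steps_py := by
  intro t _
  unfold Spec_parse_proof_steps_py parse_proof_steps_py parse_proof_steps_py_alt
  have hfold : (pvLines t).foldl pvStepA ([], none) =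
      ((pvLines t).map PySem.Str.strip).foldl pvStepAux ([], none) := by
    rw [List.foldl_map]
    rfl
  show ((match ((pvLines t).foldl pvStepA ([], none)).2 with
        | some c => ((pvLines t).foldl pvStepA ([], none)).1 ++ [c]
        | none => ((pvLines t).foldl pvStepA ([], none)).1).map PySem.Dict.items) = _
  have : (match ((pvLines t).foldl pvStepA ([], none)).2 with
        | some c => ((pvLines t).foldl pvStepA ([], none)).1 ++ [c]
        | none => ((pvLines t).foldl pvStepA ([], none)).1)
      = pvFinal (((pvLines t).map PySem.Str.strip).foldl pvStepAux ([], none)) := by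
    rw [← hfold]; rfl
  rw [this, pvInv_none, List.nil_append, List.map_map]
  apply List.map_congr_left
  intro g _
  simp [Function.comp, pvDictOf_items, pvJust]
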